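-- pv_equiv track=rewrite | github.com/roarceus/algo-atlas | src/algo_atlas/languages/cpp.py | _count_cpp_params
-- ===== SOURCE A (Python) =====
-- def _count_cpp_params(params_str: str) -> int:
--     """Count C++ params, respecting template angle-bracket nesting."""
--     if not params_str:
--         return 0
--     depth = 0
--     count = 1
--     for ch in params_str:
--         if ch == "<":
--             depth += 1
--         elif ch == ">":
--             depth -= 1
--         elif ch == "," and depth == 0:
--             count += 1
--     return count
-- ===== SOURCE B (Python) =====
-- def _count_cpp_params(params_str: str) -> int:
--     """Count C++ params, respecting template angle-bracket nesting.
--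
--     Two-pass decomposition: precompute the cumulative nesting depth after
--     each character, then count top-level commas in a zip pass.
--     """
--     if not params_str:
--         return 0
--     step = {"<": 1, ">": -1}
--     depths = []
--     d = 0
--     for ch in params_str:
--         d += step.get(ch, 0)
--         depths.append(d)
--     return 1 + sum(1 for ch, d in zip(params_str, depths) if ch == "," and d == 0)
-- ===== Notes on version B (the rewrite author's own statement) =====
-- stated objective: alternative
-- what changed: B replaces A's single fused loop carrying (depth, count) state with a precompute-then-filter decomposition: first build the cumulative depth sequence, then count top-level commas over a zip of characters and depths.
import Mathlib
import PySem

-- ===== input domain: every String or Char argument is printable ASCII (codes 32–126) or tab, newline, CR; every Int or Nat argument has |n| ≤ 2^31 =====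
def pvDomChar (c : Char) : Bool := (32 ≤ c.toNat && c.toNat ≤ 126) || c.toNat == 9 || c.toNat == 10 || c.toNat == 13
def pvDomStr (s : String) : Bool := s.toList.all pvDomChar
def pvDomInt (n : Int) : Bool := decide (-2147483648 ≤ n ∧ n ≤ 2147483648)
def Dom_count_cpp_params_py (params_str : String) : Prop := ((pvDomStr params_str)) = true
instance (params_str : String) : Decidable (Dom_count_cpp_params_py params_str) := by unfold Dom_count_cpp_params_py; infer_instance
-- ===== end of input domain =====

-- B changes the decomposition (precompute depth sequence, then count top-level commas); same O(n) cost.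

-- ===== PORT A =====
-- A's loop: one fold over the characters carrying (depth, count).
def count_cpp_params_py (params_str : String) : Int :=
  if params_str.toList = [] then 0
  else
    (params_str.toList.foldl
      (fun (st : Int × Int) ch =>
        if ch = '<' then (st.1 + 1, st.2)
        else if ch = '>' then (st.1 - 1, st.2)
        else if ch = ',' ∧ st.1 = 0 then (st.1, st.2 + 1)
        else st)
      (0, 1)).2

-- ===== PORT B =====
-- step.get(ch, 0) for the two-entry dict {'<':1, '>':-1}
def pvStep (ch : Char) : Int :=
  if ch = '<' then 1 else if ch = '>' then -1 else 0

-- the loop building `depths`: cumulative depth after each character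
def pvDepths (d : Int) : List Char → List Int
  | [] => []
  | ch :: cs => (d + pvStep ch) :: pvDepths (d + pvStep ch) cs

def count_cpp_params_py_alt (params_str : String) : Int :=
  let cs := params_str.toList
  if cs = [] then 0
  else
    1 + ((cs.zip (pvDepths 0 cs)).countP (fun p => p.1 == ',' && p.2 == 0) : Int)

-- ===== PRECONDITION & SPEC =====
def Spec_count_cpp_params_py (params_str : String) (out : Int) : Prop := out = count_cpp_params_py_alt params_str
instance (params_str : String) (out : Int) : Decidable (Spec_count_cpp_params_py params_str out) := by unfold Spec_count_cpp_params_py; infer_instance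

-- ===== CLAIM (what is proved, stated in full; the proofs are below) =====
def Claim_equal_count_cpp_params_py : Prop := ∀ (params_str : String), Dom_count_cpp_params_py params_str → Spec_count_cpp_params_py params_str (count_cpp_params_py params_str)

-- ===== LEMMAS AND PROOFS =====

-- A's fold, started at depth d and count c, returns c plus the number of
-- top-level commas counted against the depth sequence started at d.
theorem pv_loop_eq (cs : List Char) : ∀ (d c : Int),
    (cs.foldl
      (fun (st : Int × Int) ch =>
        if ch = '<' then (st.1 + 1, st.2)
        else if ch = '>' then (st.1 - 1, st.2)
        else if ch = ',' ∧ st.1 = 0 then (st.1, st.2 + 1)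
        else st)
      (d, c)).2
    = c + ((cs.zip (pvDepths d cs)).countP (fun p => p.1 == ',' && p.2 == 0) : Int) := by
  induction cs with
  | nil => intro d c; simp [pvDepths]
  | cons ch cs ih =>
    intro d c
    by_cases h1 : ch = '<'
    · subst h1
      simp [pvDepths, pvStep, List.foldl, ih]
    · by_cases h2 : ch = '>'
      · subst h2
        simp [pvDepths, pvStep, List.foldl, ih]
        rw [show d + -1 = d - 1 by ring]
      · have hstep : pvStep ch = 0 := by simp [pvStep, h1, h2]
        by_cases h3 : ch = ',' ∧ d = 0
        · obtain ⟨hc, hd⟩ := h3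
          subst hc; subst hd
          simp [pvDepths, pvStep, List.foldl, ih]
          ring
        · simp only [List.foldl, pvDepths, hstep, add_zero]
          rw [if_neg h1, if_neg h2, if_neg h3, ih]
          have : ¬ (ch == ',' && (d == (0 : Int))) = true := by
            simp only [Bool.and_eq_true, beq_iff_eq]
            exact fun hh => h3 ⟨hh.1, hh.2⟩
          simp [this]

-- ===== VERDICT (by name: the statement is the Claim_ definition above) =====
theorem count_cpp_params_py_spec : Claim_equal_count_cpp_params_py := by
  intro s _
  unfold Spec_count_cpp_params_py count_cpp_params_py count_cpp_params_py_alt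
  by_cases h : s.toList = []
  · simp [h]
  · simp only [h, pv_loop_eq]
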